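-- pv_equiv track=rewrite | github.com/Ciriera/Optimization_Planner | app/algorithms/simplex_new.py | _repair_duplicates_simplex
-- ===== SOURCE A (Python) =====
-- def _repair_duplicates_simplex(assignments):
--     """Simplex-specific duplicate repair using linear programming approach"""
--     from collections import defaultdict
--
--     # Group by project_id and keep the best assignment
--     project_assignments = defaultdict(list)
--     for assignment in assignments:
--         project_id = assignment.get("project_id")
--         if project_id:
--             project_assignments[project_id].append(assignment)
--
--     # For each project, keep the assignment with highest priority slot
--     repaired = []
--     for project_id, project_list in project_assignments.items():
--         if len(project_list) == 1:
--             repaired.append(project_list[0])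
--         else:
--             # Choose the assignment with earliest timeslot
--             best_assignment = min(project_list, key=lambda x: x.get("timeslot_id", ""))
--             repaired.append(best_assignment)
--
--     return repaired
-- ===== SOURCE B (Python) =====
-- def _repair_duplicates_simplex(assignments):
--     """Single pass: keep the running best (earliest-timeslot) assignment per project."""
--     best = {}
--     for a in assignments:
--         pid = a.get("project_id")
--         if not pid:
--             continue
--         cur = best.get(pid)
--         if cur is None or a.get("timeslot_id", "") < cur.get("timeslot_id", ""):
--             best[pid] = a
--     return list(best.values())
-- ===== Notes on version B (the rewrite author's own statement) =====
-- stated objective: simpler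
-- what changed: Replaces the two-phase group-then-min approach (defaultdict of per-project lists, then a min() over each list) with a single pass that keeps one running best assignment per project in a dict and returns its values.
import Mathlib
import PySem

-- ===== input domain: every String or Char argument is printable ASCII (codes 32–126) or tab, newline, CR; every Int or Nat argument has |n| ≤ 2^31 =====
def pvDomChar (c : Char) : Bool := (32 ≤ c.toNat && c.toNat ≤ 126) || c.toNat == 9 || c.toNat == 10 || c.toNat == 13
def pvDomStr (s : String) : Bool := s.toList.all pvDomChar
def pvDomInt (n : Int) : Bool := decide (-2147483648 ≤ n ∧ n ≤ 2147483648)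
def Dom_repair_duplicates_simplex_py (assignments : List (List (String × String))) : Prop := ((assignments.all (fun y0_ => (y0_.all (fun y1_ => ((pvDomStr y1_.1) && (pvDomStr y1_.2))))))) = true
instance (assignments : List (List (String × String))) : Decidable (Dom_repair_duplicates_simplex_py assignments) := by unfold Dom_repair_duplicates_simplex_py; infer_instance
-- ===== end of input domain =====

-- B replaces A's group-into-lists-then-min() two-phase repair with a single pass keeping one running best assignment per project; same result, less intermediate state.


-- ===== PORT A =====
-- assignment.get(k) on the association-list dict: first match (exact for Python dict.get)
def pvGet? (a : List (String × String)) (k : String) : Option String :=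
  (a.find? (fun p => p.1 == k)).map (·.2)

-- x.get("timeslot_id", "")
def pvTimeslot (a : List (String × String)) : String :=
  (pvGet? a "timeslot_id").getD ""

-- loop body of A's grouping loop: skip falsy project_id, else defaultdict-append
def pvStepA (d : PySem.Dict String (List (List (String × String))))
    (a : List (String × String)) : PySem.Dict String (List (List (String × String))) :=
  match pvGet? a "project_id" with
  | none => d
  | some pid => if pid = "" then d else d.modify pid [] (· ++ [a])

def repair_duplicates_simplex_py (assignments : List (List (String × String))) : List (List (String × String)) :=
  let groups := assignments.foldl pvStepA PySem.Dict.empty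
  groups.items.foldl (fun rep q =>
    if q.2.length = 1 then rep ++ [PySem.List.pyGetD q.2 0 []]
    else rep ++ [(PySem.List.min? q.2 pvTimeslot).getD []]) []

-- ===== PORT B =====
-- loop body of B's single pass: keep the running best assignment per project
def pvStepB (best : PySem.Dict String (List (String × String)))
    (a : List (String × String)) : PySem.Dict String (List (String × String)) :=
  match pvGet? a "project_id" with
  | none => best
  | some pid =>
    if pid = "" then best
    else
      match best.get? pid with
      | none => best.insert pid a
      | some cur => if pvTimeslot a < pvTimeslot cur then best.insert pid a else best

def repair_duplicates_simplex_py_alt (assignments : List (List (String × String))) : List (List (String × String)) :=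
  (assignments.foldl pvStepB PySem.Dict.empty).values

-- ===== PRECONDITION & SPEC =====
def Spec_repair_duplicates_simplex_py (assignments : List (List (String × String))) (out : List (List (String × String))) : Prop := out = repair_duplicates_simplex_py_alt assignments
instance (assignments : List (List (String × String))) (out : List (List (String × String))) : Decidable (Spec_repair_duplicates_simplex_py assignments out) := by unfold Spec_repair_duplicates_simplex_py; infer_instance

-- ===== CLAIM (what is proved, stated in full; the proofs are below) =====
def Claim_equal_repair_duplicates_simplex_py : Prop := ∀ (assignments : List (List (String × String))), Dom_repair_duplicates_simplex_py assignments → Spec_repair_duplicates_simplex_py assignments (repair_duplicates_simplex_py assignments)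

-- ===== LEMMAS AND PROOFS =====

-- min over a list extended by one element: compare the new element with the old minimum
theorem pv_min?_append_singleton {α κ : Type} [LinearOrder κ] (l : List α) (key : α → κ)
    (m a : α) (h : PySem.List.min? l key = some m) :
    PySem.List.min? (l ++ [a]) key = some (if key a < key m then a else m) := by
  simp only [PySem.List.min?, List.foldl_append] at *
  rw [h]
  simp only [List.foldl]
  split <;> rfl

theorem pv_min?_singleton {α κ : Type} [LinearOrder κ] (a : α) (key : α → κ) :
    PySem.List.min? [a] key = some a := by
  simp [PySem.List.min?, List.foldl]

-- the central invariant: the grouping dict of A and the running-best dict of B stay in lockstep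
theorem pv_invariant (l : List (List (String × String))) :
    ∀ (d : PySem.Dict String (List (List (String × String))))
      (b : PySem.Dict String (List (String × String))),
      d.keys.Nodup →
      b.keys = d.keys →
      (∀ p, p ∈ d.keys → d.getD p [] ≠ [] ∧
            b.get? p = PySem.List.min? (d.getD p []) pvTimeslot) →
      (l.foldl pvStepA d).keys.Nodup ∧
      (l.foldl pvStepB b).keys = (l.foldl pvStepA d).keys ∧
      (∀ p, p ∈ (l.foldl pvStepA d).keys → (l.foldl pvStepA d).getD p [] ≠ [] ∧
            (l.foldl pvStepB b).get? p
              = PySem.List.min? ((l.foldl pvStepA d).getD p []) pvTimeslot) := by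
  induction l with
  | nil => intro d b h1 h2 h3; exact ⟨h1, h2, h3⟩
  | cons a t ih =>
    intro d b h1 h2 h3
    simp only [List.foldl_cons]
    by_cases hok : ∃ pid, pvGet? a "project_id" = some pid ∧ pid ≠ ""
    · obtain ⟨pid, hpid, hne⟩ := hok
      have hA : pvStepA d a = d.modify pid [] (· ++ [a]) := by
        simp [pvStepA, hpid, hne]
      by_cases hmem : pid ∈ d.keys
      · -- existing project: A appends to its list, B compares with the stored best
        have hcont : d.contains pid = true := (PySem.Dict.contains_iff_mem_keys d pid).mpr hmem
        obtain ⟨hne0, hget⟩ := h3 pid hmem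
        obtain ⟨m, hm⟩ : ∃ m, PySem.List.min? (d.getD pid []) pvTimeslot = some m := by
          cases hmin : PySem.List.min? (d.getD pid []) pvTimeslot with
          | none => exact absurd ((PySem.List.min?_eq_none_iff _ _).mp hmin) hne0
          | some m => exact ⟨m, rfl⟩
        have hbget : b.get? pid = some m := hget.trans hm
        have hB : pvStepB b a =
            (if pvTimeslot a < pvTimeslot m then b.insert pid a else b) := by
          simp [pvStepB, hpid, hne, hbget]
        have hkA : (pvStepA d a).keys = d.keys := by
          rw [hA]
          unfold PySem.Dict.modify
          exact PySem.Dict.keys_insert_of_contains d _ hcont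
        have hkB : (pvStepB b a).keys = b.keys := by
          rw [hB]
          split
          · exact PySem.Dict.keys_insert_of_contains b _
              ((PySem.Dict.contains_iff_mem_keys b pid).mpr (h2 ▸ hmem))
          · rfl
        refine ih (pvStepA d a) (pvStepB b a) (hkA ▸ h1) (by rw [hkA, hkB, h2]) ?_
        intro p hp
        rw [hkA] at hp
        by_cases hpp : p = pid
        · subst hpp
          have hgd : (pvStepA d a).getD p [] = d.getD p [] ++ [a] := by
            rw [hA]; simpa using PySem.Dict.getD_modify d p p [] (· ++ [a])
          have hmin' := pv_min?_append_singleton (d.getD p []) pvTimeslot m a hm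
          constructor
          · rw [hgd]; simp
          · rw [hgd, hmin', hB]
            split
            · simp [PySem.Dict.get?_insert]
            · rw [hbget]
        · obtain ⟨hne0', hget'⟩ := h3 p hp
          have hgd : (pvStepA d a).getD p [] = d.getD p [] := by
            rw [hA]; simpa [hpp] using PySem.Dict.getD_modify d pid p [] (· ++ [a])
          have hgb : (pvStepB b a).get? p = b.get? p := by
            rw [hB]; split
            · simp [PySem.Dict.get?_insert, hpp]
            · rfl
          exact ⟨hgd ▸ hne0', by rw [hgb, hgd]; exact hget'⟩
      · -- new project: both dicts append the key
        have hcont : d.contains pid = false := by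
          by_contra h
          exact hmem ((PySem.Dict.contains_iff_mem_keys d pid).mp (by simpa using h))
        have hcontb : b.contains pid = false := by
          by_contra h
          exact hmem (h2 ▸ (PySem.Dict.contains_iff_mem_keys b pid).mp (by simpa using h))
        have hbnone : b.get? pid = none := by
          cases hg : b.get? pid with
          | none => rfl
          | some v =>
            have := PySem.Dict.contains_eq_isSome_get? (d := b) (k := pid)
            rw [hg] at this; rw [hcontb] at this; simp at this
        have hB : pvStepB b a = b.insert pid a := by
          simp [pvStepB, hpid, hne, hbnone]
        have hdnone : d.getD pid [] = [] := PySem.Dict.getD_of_not_contains d [] hcont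
        have hkA : (pvStepA d a).keys = d.keys ++ [pid] := by
          rw [hA]
          unfold PySem.Dict.modify
          exact PySem.Dict.keys_insert_of_not_contains d _ hcont
        have hkB : (pvStepB b a).keys = b.keys ++ [pid] := by
          rw [hB]
          exact PySem.Dict.keys_insert_of_not_contains b _ hcontb
        refine ih (pvStepA d a) (pvStepB b a)
          (by rw [hkA]
              simp only [List.nodup_append, List.nodup_cons]
              exact ⟨h1, by simp, fun x hx y hy => by simp at hy; exact hy ▸ fun h => hmem (h ▸ hx)⟩)
          (by rw [hkA, hkB, h2]) ?_
        intro p hp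
        rw [hkA] at hp
        by_cases hpp : p = pid
        · subst hpp
          have hgd : (pvStepA d a).getD p [] = [a] := by
            rw [hA]
            have := PySem.Dict.getD_modify d p p [] (· ++ [a])
            simpa [hdnone] using this
          refine ⟨by rw [hgd]; simp, ?_⟩
          rw [hgd, pv_min?_singleton, hB]
          simp [PySem.Dict.get?_insert]
        · have hp' : p ∈ d.keys := by
            rcases List.mem_append.mp hp with h | h
            · exact h
            · simp at h; exact absurd h hpp
          obtain ⟨hne0', hget'⟩ := h3 p hp'
          have hgd : (pvStepA d a).getD p [] = d.getD p [] := by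
            rw [hA]; simpa [hpp] using PySem.Dict.getD_modify d pid p [] (· ++ [a])
          have hgb : (pvStepB b a).get? p = b.get? p := by
            rw [hB]; simp [PySem.Dict.get?_insert, hpp]
          exact ⟨hgd ▸ hne0', by rw [hgb, hgd]; exact hget'⟩
    · -- falsy project_id: both loops skip the assignment
      push_neg at hok
      have hA : pvStepA d a = d := by
        unfold pvStepA
        cases hg : pvGet? a "project_id" with
        | none => rfl
        | some pid => simp [hok pid hg]
      have hB : pvStepB b a = b := by
        unfold pvStepB
        cases hg : pvGet? a "project_id" with
        | none => rfl
        | some pid => simp [hok pid hg]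
      rw [hA, hB]
      exact ih d b h1 h2 h3

-- A's output loop is a map over the grouped items
theorem pv_foldl_append_map {α β : Type} (l : List α) (g : α → β) :
    ∀ acc : List β, l.foldl (fun rep q => rep ++ [g q]) acc = acc ++ l.map g := by
  induction l with
  | nil => intro acc; simp
  | cons x t ih => intro acc; simp [List.foldl_cons, ih]

-- ===== VERDICT (by name: the statement is the Claim_ definition above) =====
theorem repair_duplicates_simplex_py_spec : Claim_equal_repair_duplicates_simplex_py := by
  intro assignments _
  unfold Spec_repair_duplicates_simplex_py repair_duplicates_simplex_py repair_duplicates_simplex_py_alt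
  obtain ⟨hnd, hkeys, hval⟩ := pv_invariant assignments PySem.Dict.empty PySem.Dict.empty
    (by simp [PySem.Dict.empty, PySem.Dict.keys])
    (by rfl)
    (by intro p hp; simp [PySem.Dict.empty, PySem.Dict.keys] at hp)
  set D := assignments.foldl pvStepA PySem.Dict.empty with hD
  set B := assignments.foldl pvStepB PySem.Dict.empty with hB
  have hndB : B.keys.Nodup := hkeys ▸ hnd
  have hfun : (fun (rep : List (List (String × String))) (q : String × List (List (String × String))) =>
      if q.2.length = 1 then rep ++ [PySem.List.pyGetD q.2 0 []]
      else rep ++ [(PySem.List.min? q.2 pvTimeslot).getD []])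
      = (fun rep q => rep ++ [(PySem.List.min? q.2 pvTimeslot).getD []]) := by
    funext rep q
    by_cases hl : q.2.length = 1
    · obtain ⟨x, hx⟩ := List.length_eq_one_iff.mp hl
      simp [hl, hx, pv_min?_singleton, PySem.List.pyGetD, PySem.List.pyGet?, PySem.List.pyIdx?]
    · simp [hl]
  show (List.foldl _ [] D.items) = B.values
  rw [hfun, pv_foldl_append_map, List.nil_append,
      PySem.Dict.items_eq_map_keys D hnd [],
      PySem.Dict.values_eq_map_keys B hndB [],
      hkeys, List.map_map]
  refine List.map_congr_left ?_
  intro p hp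
  obtain ⟨hne0, hget⟩ := hval p hp
  obtain ⟨m, hm⟩ : ∃ m, PySem.List.min? (D.getD p []) pvTimeslot = some m := by
    cases hmin : PySem.List.min? (D.getD p []) pvTimeslot with
    | none => exact absurd ((PySem.List.min?_eq_none_iff _ _).mp hmin) hne0
    | some m => exact ⟨m, rfl⟩
  simp only [Function.comp]
  rw [hm, PySem.Dict.getD_eq_get?_getD B p [], hget, hm]
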